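-- pv_equiv track=rewrite | github.com/OghenefegaOmajene/Python-Tasks | maxDifference.py | maxDifferenceWithIndices
-- ===== SOURCE A (Python) =====
-- def maxDifferenceWithIndices(arr):
--     """
--     Find maximum difference and return the indices of the elements.
--
--     Args:
--         arr (list): List of numbers
--
--     Returns:
--         tuple: (max_difference, min_index, max_index) or (None, -1, -1)
--     """
--     if len(arr) < 2:
--         return (None, -1, -1)
--
--     min_so_far = arr[0]
--     min_index = 0
--     max_diff = float('-inf')
--     best_min_index = 0
--     best_max_index = 1
--
--     for i in range(1, len(arr)):
--         current_diff = arr[i] - min_so_far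
--
--         if current_diff > max_diff:
--             max_diff = current_diff
--             best_min_index = min_index
--             best_max_index = i
--
--         if arr[i] < min_so_far:
--             min_so_far = arr[i]
--             min_index = i
--
--     return (max_diff, best_min_index, best_max_index)
-- ===== SOURCE B (Python) =====
-- def maxDifferenceWithIndices(arr):
--     """
--     Find maximum difference and return the indices of the elements.
--
--     Brute-force nested scan over all pairs i < j, keeping the first pair
--     (in (j, i) ascending order) attaining the maximum arr[j] - arr[i].
--     """
--     if len(arr) < 2:
--         return (None, -1, -1)
--
--     max_diff = float('-inf')
--     best_min_index = 0
--     best_max_index = 1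
--
--     for j in range(1, len(arr)):
--         for i in range(0, j):
--             diff = arr[j] - arr[i]
--             if diff > max_diff:
--                 max_diff = diff
--                 best_min_index = i
--                 best_max_index = j
--
--     return (max_diff, best_min_index, best_max_index)
-- ===== Notes on version B (the rewrite author's own statement) =====
-- stated objective: alternative
-- what changed: Replaces A's single min-so-far pass with an explicit brute-force nested scan over all pairs i < j, updating on strictly greater difference; it trades A's linear time for plainer all-pairs logic with the same tie-breaking.
import Mathlib
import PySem

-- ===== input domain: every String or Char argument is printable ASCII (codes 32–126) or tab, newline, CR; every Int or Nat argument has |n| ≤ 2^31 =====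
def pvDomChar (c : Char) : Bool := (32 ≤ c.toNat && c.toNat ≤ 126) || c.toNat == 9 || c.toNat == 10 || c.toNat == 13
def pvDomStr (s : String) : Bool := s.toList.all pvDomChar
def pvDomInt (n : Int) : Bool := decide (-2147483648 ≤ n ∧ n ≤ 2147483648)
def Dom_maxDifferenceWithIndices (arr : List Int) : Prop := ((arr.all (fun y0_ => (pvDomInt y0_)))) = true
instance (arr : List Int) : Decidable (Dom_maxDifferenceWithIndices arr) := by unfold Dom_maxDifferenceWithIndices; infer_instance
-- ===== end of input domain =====

-- B replaces A's single min-so-far pass with a brute-force nested scan over all pairs i < j (alternative decomposition, same results).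

-- ===== PORT A =====
-- float('-inf') as initial max_diff is modelled as `none` in Option Int: `pvGt c none = true` (anything beats -inf).
def pvGt (c : Int) : Option Int → Bool
  | none => true
  | some v => decide (v < c)

-- loop body of A; state = (min_so_far, min_index, max_diff, best_min_index, best_max_index).
-- arr[i] is read with pyGetD (exact here: every index produced by range(1, len(arr)) is in range).
def pvStepA (arr : List Int) (s : Int × Int × Option Int × Int × Int) (i : Int) :
    Int × Int × Option Int × Int × Int :=
  let cd := PySem.List.pyGetD arr i 0 - s.1
  let t : Option Int × Int × Int :=
    if pvGt cd s.2.2.1 then (some cd, s.2.1, i) else s.2.2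
  if PySem.List.pyGetD arr i 0 < s.1 then (PySem.List.pyGetD arr i 0, i, t) else (s.1, s.2.1, t)

def maxDifferenceWithIndices (arr : List Int) : Option Int × Int × Int :=
  if arr.length < 2 then (none, -1, -1)
  else
    let s := (PySem.List.pyRange 1 (arr.length : Int) 1).foldl (pvStepA arr)
      (PySem.List.pyGetD arr 0 0, 0, none, 0, 1)
    s.2.2

-- ===== PORT B =====
-- inner loop body; state = (max_diff, best_min_index, best_max_index); arr[j], arr[i] via pyGetD (indices always in range).
def pvStepB (arr : List Int) (j : Int) (s : Option Int × Int × Int) (i : Int) :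
    Option Int × Int × Int :=
  let d := PySem.List.pyGetD arr j 0 - PySem.List.pyGetD arr i 0
  if pvGt d s.1 then (some d, i, j) else s

def maxDifferenceWithIndices_alt (arr : List Int) : Option Int × Int × Int :=
  if arr.length < 2 then (none, -1, -1)
  else
    (PySem.List.pyRange 1 (arr.length : Int) 1).foldl
      (fun s j => (PySem.List.pyRange 0 j 1).foldl (pvStepB arr j) s)
      (none, 0, 1)

-- ===== PRECONDITION & SPEC =====
def Spec_maxDifferenceWithIndices (arr : List Int) (out : Option Int × Int × Int) : Prop := out = maxDifferenceWithIndices_alt arr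
instance (arr : List Int) (out : Option Int × Int × Int) : Decidable (Spec_maxDifferenceWithIndices arr out) := by unfold Spec_maxDifferenceWithIndices; infer_instance

-- ===== CLAIM (what is proved, stated in full; the proofs are below) =====
def Claim_equal_maxDifferenceWithIndices : Prop := ∀ (arr : List Int), Dom_maxDifferenceWithIndices arr → Spec_maxDifferenceWithIndices arr (maxDifferenceWithIndices arr)

-- ===== LEMMAS AND PROOFS =====

-- (pvPm arr k) = (min of arr[0..k], index of its first occurrence).
def pvPm (arr : List Int) : Nat → Int × Int
  | 0 => (PySem.List.pyGetD arr 0 0, 0)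
  | k + 1 =>
    if PySem.List.pyGetD arr ((k : Int) + 1) 0 < (pvPm arr k).1
      then (PySem.List.pyGetD arr ((k : Int) + 1) 0, (k : Int) + 1) else pvPm arr k

-- B's inner loop over range(0, k+1) at fixed outer index J collapses to one candidate step
-- with the prefix minimum (first occurrence, because the comparison is strict).
lemma pvInner (arr : List Int) (J : Int) (k : Nat) (s : Option Int × Int × Int) :
    (PySem.List.pyRange 0 ((k : Int) + 1) 1).foldl (pvStepB arr J) s =
      (if pvGt (PySem.List.pyGetD arr J 0 - (pvPm arr k).1) s.1
        then (some (PySem.List.pyGetD arr J 0 - (pvPm arr k).1), (pvPm arr k).2, J)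
        else s) := by
  induction k generalizing s with
  | zero =>
    rw [show ((0 : Nat) : Int) + 1 = 0 + 1 by ring, PySem.List.pyRange_one_singleton]
    simp [pvStepB, pvPm]
  | succ k ih =>
    rw [show (((k + 1 : Nat) : Int) + 1) = ((k : Int) + 1) + 1 by omega,
      PySem.List.pyRange_one_succ_right (by omega), List.foldl_append, ih]
    obtain ⟨md, bi, bj⟩ := s
    simp only [List.foldl_cons, List.foldl_nil, pvStepB, pvPm]
    cases md <;> simp [pvGt] <;> split_ifs <;> simp_all <;> omega

-- A's fold state equals (prefix min, prefix argmin, B's outer fold state).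
lemma pvOuter (arr : List Int) (k : Nat) :
    (PySem.List.pyRange 1 ((k : Int) + 1) 1).foldl (pvStepA arr)
        (PySem.List.pyGetD arr 0 0, 0, none, 0, 1) =
      ((pvPm arr k).1, (pvPm arr k).2,
        (PySem.List.pyRange 1 ((k : Int) + 1) 1).foldl
          (fun s j => (PySem.List.pyRange 0 j 1).foldl (pvStepB arr j) s) (none, 0, 1)) := by
  induction k with
  | zero => simp [PySem.List.pyRange_one_eq_nil, pvPm]
  | succ k ih =>
    rw [show (((k + 1 : Nat) : Int) + 1) = ((k : Int) + 1) + 1 by omega,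
      PySem.List.pyRange_one_succ_right (by omega), List.foldl_append, List.foldl_append, ih]
    simp only [List.foldl_cons, List.foldl_nil]
    rw [show ((k : Int) + 1) = ((k : Nat) : Int) + 1 by omega, pvInner]
    simp only [pvStepA, pvPm]
    split_ifs <;> simp_all

-- ===== VERDICT (by name: the statement is the Claim_ definition above) =====
theorem maxDifferenceWithIndices_spec : Claim_equal_maxDifferenceWithIndices := by
  intro arr _
  unfold Spec_maxDifferenceWithIndices maxDifferenceWithIndices maxDifferenceWithIndices_alt
  by_cases h : arr.length < 2
  · simp [h]
  · simp only [h, if_false]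
    obtain ⟨k, hk⟩ : ∃ k : Nat, arr.length = k + 1 := ⟨arr.length - 1, by omega⟩
    rw [hk]
    rw [show ((k + 1 : Nat) : Int) = (k : Int) + 1 by omega, pvOuter arr k]
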